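-- pv_equiv track=rewrite | github.com/ProfeLuisFCFM/ProBas-EJ25-3pm | Semana 10/divideyvenceras.py | suma4
-- ===== SOURCE A (Python) =====
-- def suma4(n):
--     sum = 0
--     for i in range(1,(n//4)+1):
--         sum += i
--         sum += (n+1)-i
--         sum += n//4 + i
--         sum += (n-(n//4)+1)-i
--     return sum
-- ===== SOURCE B (Python) =====
-- def suma4(n):
--     k = n // 4
--     return k * (2 * n + 2) if k > 0 else 0
-- ===== Notes on version B (the rewrite author's own statement) =====
-- stated objective: faster
-- what changed: Replaced the n//4-iteration accumulation loop by the closed form (n//4)*(2*n+2), since the four terms added per iteration always sum to the constant 2*n+2.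
import Mathlib
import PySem

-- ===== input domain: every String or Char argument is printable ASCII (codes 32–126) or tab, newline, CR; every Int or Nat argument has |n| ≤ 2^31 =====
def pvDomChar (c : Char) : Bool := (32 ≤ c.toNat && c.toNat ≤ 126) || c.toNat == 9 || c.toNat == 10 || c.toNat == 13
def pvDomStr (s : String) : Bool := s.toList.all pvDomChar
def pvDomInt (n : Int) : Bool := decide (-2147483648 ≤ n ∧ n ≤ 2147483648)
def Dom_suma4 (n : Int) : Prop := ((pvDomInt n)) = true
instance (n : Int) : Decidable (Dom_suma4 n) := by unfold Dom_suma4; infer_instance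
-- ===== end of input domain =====

-- B replaces A's per-iteration accumulation by the closed form (n//4)*(2*n+2): faster (O(1) vs O(n)).

-- ===== PORT A =====
def suma4 (n : Int) : Int :=
  (PySem.List.pyRange 1 (PySem.Int.floordiv n 4 + 1) 1).foldl
    (fun sum i =>
      let sum := sum + i
      let sum := sum + ((n + 1) - i)
      let sum := sum + (PySem.Int.floordiv n 4 + i)
      sum + ((n - PySem.Int.floordiv n 4 + 1) - i)) 0

-- ===== PORT B =====
def suma4_alt (n : Int) : Int :=
  let k := PySem.Int.floordiv n 4
  if k > 0 then k * (2 * n + 2) else 0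

-- ===== PRECONDITION & SPEC =====
def Spec_suma4 (n : Int) (out : Int) : Prop := out = suma4_alt n
instance (n : Int) (out : Int) : Decidable (Spec_suma4 n out) := by unfold Spec_suma4; infer_instance

-- ===== CLAIM (what is proved, stated in full; the proofs are below) =====
def Claim_equal_suma4 : Prop := ∀ (n : Int), Dom_suma4 n → Spec_suma4 n (suma4 n)

-- ===== LEMMAS AND PROOFS =====

-- folding a constant addition over any list adds length-times the constant
theorem foldl_add_const (c : Int) (l : List Int) (s : Int) :
    l.foldl (fun s (_ : Int) => s + c) s = s + l.length * c := by
  induction l generalizing s with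
  | nil => simp
  | cons a t ih => simp [List.foldl, ih]; ring

-- ===== VERDICT (by name: the statement is the Claim_ definition above) =====
theorem suma4_spec : Claim_equal_suma4 := by
  intro n _
  unfold Spec_suma4 suma4 suma4_alt
  have hf : (fun (sum i : Int) =>
      let sum := sum + i
      let sum := sum + ((n + 1) - i)
      let sum := sum + (PySem.Int.floordiv n 4 + i)
      sum + ((n - PySem.Int.floordiv n 4 + 1) - i))
      = fun (s : Int) (_ : Int) => s + (2 * n + 2) := by
    funext s i; simp only []; ring
  rw [hf, foldl_add_const, PySem.List.length_pyRange_one]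
  set k := PySem.Int.floordiv n 4 with hk
  by_cases h : k > 0
  · simp only [if_pos h]
    have : ((k + 1 - 1).toNat : Int) = k := by omega
    rw [show k + 1 - 1 = k by ring, ]
    have : ((k.toNat : Int)) = k := by omega
    rw [this]; ring
  · simp only [if_neg h]
    have : (k + 1 - 1).toNat = 0 := by omega
    rw [this]; simp
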